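-- pv_equiv track=rewrite | github.com/pypi-data/pypi-mirror-151 | packages/mcHelpers/mcHelpers-6.5-py2.7.egg/mcHelpers/test.py | tableId
-- ===== SOURCE A (Python) =====
-- def intToBin(number, index, feature=True):
--     """index为该数据位宽,number为待转换数据,
--     feature为True则进行十进制转二进制，为False则进行二进制转十进制。"""
--
--     if (feature == True):  # 十进制转换为二进制
--         if (number >= 0):
--             b = bin(number)
--             b = '0' * (index + 2 - len(b)) + b
--         else:
--             b = 2 ** (index) + number
--             b = bin(b)
--             b = '1' * (index + 2 - len(b)) + b  # 注意这里算出来的结果是补码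
--         b = b.replace("0b", '')
--         b = b.replace('-', '')
--         return b
--     elif (feature == False):  # 二进制转换为十进制
--         i = int(str(number), 2)
--         if (i >= 2 ** (index - 1)):  # 如果是负数
--             i = -(2 ** index - i)
--             return i
--         else:
--             return i
--
-- def tableId(storeId,maxId):
--     a = intToBin(storeId, 64)
--     b = '0' * 32 +a[0:32]
--     c = ''
--     for i in range(len(a)):
--         if a[i] == b[i]:
--             c += '0'
--         else:
--             c += '1'
--     return(int('0b' + c[33:], base=2))%int(maxId)
-- ===== SOURCE B (Python) =====
-- def tableId(storeId, maxId):
--     # Fold the 64-bit two's-complement value of storeId: XOR its low 31 bits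
--     # with bits 32..62, then reduce mod maxId. No strings, no per-bit loop.
--     n = storeId % (1 << 64)
--     folded = (n % (1 << 31)) ^ ((n // (1 << 32)) % (1 << 31))
--     return folded % int(maxId)
-- ===== Notes on version B (the rewrite author's own statement) =====
-- stated objective: simpler
-- what changed: Replaces the binary-string construction, 32-zero-padded copy and 64-iteration character-comparison loop with three integer operations: reduce storeId mod 2^64 (two's complement), XOR the low 31 bits with bits 32..62 via mask/shift arithmetic, then take the result mod maxId.
import Mathlib
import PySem

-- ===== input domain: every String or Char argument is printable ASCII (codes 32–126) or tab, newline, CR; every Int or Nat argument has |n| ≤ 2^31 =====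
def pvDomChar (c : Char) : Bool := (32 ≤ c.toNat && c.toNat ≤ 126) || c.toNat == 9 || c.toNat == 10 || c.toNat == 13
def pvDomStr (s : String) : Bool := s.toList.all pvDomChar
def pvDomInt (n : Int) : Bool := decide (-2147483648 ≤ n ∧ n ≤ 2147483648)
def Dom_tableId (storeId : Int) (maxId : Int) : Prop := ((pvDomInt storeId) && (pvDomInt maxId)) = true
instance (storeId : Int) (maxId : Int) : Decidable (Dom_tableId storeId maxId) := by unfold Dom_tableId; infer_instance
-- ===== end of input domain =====

-- B replaces A's binary-string building and 64-step character loop by three integer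
-- operations (mod 2^64, XOR of two 31-bit fields, mod maxId); objective: simpler.

-- ===== PORT A =====

-- int(cs, base=2): hand port, exact on strings of the form '0b' + nonempty binary digits,
-- the only shape tableId ever passes to it.
def intBase2 (cs : List Char) : Int :=
  match cs with
  | '0' :: 'b' :: ds =>
      ((ds.foldl (fun acc c => 2 * acc + (if c = '1' then 1 else 0)) 0 : Nat) : Int)
  | _ => 0

-- intToBin: the feature=True (decimal → binary string) branch, transliterated.
-- The feature=False branch of the Python returns an int, not a str; tableId never takes
-- it, so it is not ported (it could not share this return type).
-- '2 ** index' is ported as 2 ^ index.toNat: exact for index ≥ 0 (tableId passes 64;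
-- Python's 2 ** negative would be a float anyway).
def intToBin (number : Int) (index : Int) (feature : Bool) : List Char :=
  if feature = true then
    let b :=
      if number ≥ 0 then
        let b := PySem.Int.toBinChars0b number            -- bin(number)
        List.replicate (index + 2 - (b.length : Int)).toNat '0' ++ b
      else
        let b2 := 2 ^ index.toNat + number                -- 2 ** index + number
        let b := PySem.Int.toBinChars0b b2                -- bin(b)
        List.replicate (index + 2 - (b.length : Int)).toNat '1' ++ b
    let b := PySem.Chars.replace b ['0', 'b'] []          -- b.replace("0b", '')
    PySem.Chars.replace b ['-'] []                        -- b.replace('-', '')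
  else []

def tableId (storeId : Int) (maxId : Int) : Int :=
  let a := intToBin storeId 64 true
  let b := List.replicate 32 '0' ++ PySem.List.slice a (some 0) (some 32)
  let c := (PySem.List.pyRange 0 (a.length : Int) 1).foldl
      (fun c i =>
        if PySem.List.pyGetD a i ' ' = PySem.List.pyGetD b i ' ' then c ++ ['0']
        else c ++ ['1']) []
  PySem.Int.mod (intBase2 (['0', 'b'] ++ PySem.List.slice c (some 33) none)) maxId

-- ===== PORT B =====
def tableId_alt (storeId : Int) (maxId : Int) : Int :=
  let n := PySem.Int.mod storeId 18446744073709551616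
  let folded := PySem.Int.bxor (PySem.Int.mod n 2147483648)
      (PySem.Int.mod (PySem.Int.floordiv n 4294967296) 2147483648)
  PySem.Int.mod folded maxId

-- ===== PRECONDITION & SPEC =====
-- Pre_ excludes exactly maxId = 0, where the Python (both A and B) raises ZeroDivisionError.
def Pre_tableId (storeId : Int) (maxId : Int) : Prop := maxId ≠ 0
instance (storeId : Int) (maxId : Int) : Decidable (Pre_tableId storeId maxId) := by
  unfold Pre_tableId; infer_instance

def pvWitness_tableId : Int × Int := (7, 5)

def Spec_tableId (storeId : Int) (maxId : Int) (out : Int) : Prop := out = tableId_alt storeId maxId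
instance (storeId : Int) (maxId : Int) (out : Int) : Decidable (Spec_tableId storeId maxId out) := by
  unfold Spec_tableId; infer_instance

-- ===== CLAIM (what is proved, stated in full; the proofs are below) =====
def Claim_equal_tableId : Prop := ∀ (storeId : Int) (maxId : Int), Dom_tableId storeId maxId → Pre_tableId storeId maxId → Spec_tableId storeId maxId (tableId storeId maxId)



-- ===== LEMMAS AND PROOFS =====

-- significant binary digits of n, most significant first (sig 0 = [])
def sig (n : Nat) : List Char :=
  if n = 0 then [] else sig (n / 2) ++ [if n % 2 = 1 then '1' else '0']
termination_by n
decreasing_by exact Nat.div_lt_self (Nat.pos_of_ne_zero (by assumption)) (by norm_num)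

-- k-bit binary of n mod 2^k, most significant first
def fixBin (k : Nat) (n : Nat) : List Char :=
  match k with
  | 0 => []
  | k + 1 => fixBin k (n / 2) ++ [if n % 2 = 1 then '1' else '0']

def parseA (a : Nat) (l : List Char) : Nat :=
  l.foldl (fun acc c => 2 * acc + (if c = '1' then 1 else 0)) a

theorem sig_zero : sig 0 = [] := by rw [sig]; norm_num

theorem sig_one : sig 1 = ['1'] := by rw [sig]; norm_num [sig_zero]

theorem fixBin_length (k n : Nat) : (fixBin k n).length = k := by
  induction k generalizing n with
  | zero => rfl
  | succ k ih => simp [fixBin, ih]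

theorem fixBin_zero (k : Nat) : fixBin k 0 = List.replicate k '0' := by
  induction k with
  | zero => rfl
  | succ k ih => simp [fixBin, ih, List.replicate_succ' (n := k)]

theorem fixBin_split (j k n : Nat) : fixBin (j + k) n = fixBin j (n / 2 ^ k) ++ fixBin k n := by
  induction k generalizing n with
  | zero => simp [fixBin]
  | succ k ih =>
      show fixBin (j + k + 1) n = _
      rw [fixBin, ih, fixBin]
      rw [Nat.div_div_eq_div_mul, show 2 * 2 ^ k = 2 ^ (k + 1) by ring]
      simp [List.append_assoc]

theorem mem_sig (n : Nat) : ∀ c ∈ sig n, c = '0' ∨ c = '1' := by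
  induction n using Nat.strong_induction_on with
  | _ n ih =>
      intro c hc
      by_cases h0 : n = 0
      · rw [h0, sig_zero] at hc; simp at hc
      · rw [sig, if_neg h0] at hc
        rcases List.mem_append.1 hc with h | h
        · exact ih (n / 2) (Nat.div_lt_self (Nat.pos_of_ne_zero h0) (by norm_num)) c h
        · simp at h; split at h <;> simp [h]

-- Nat.toDigits 2 agrees with sig (with bin(0) = "0")
theorem toDigitsCore_eq : ∀ (fuel n : Nat) (ds : List Char), n < fuel →
    Nat.toDigitsCore 2 fuel n ds = (if n = 0 then ['0'] else sig n) ++ ds := by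
  intro fuel
  induction fuel with
  | zero => intro n ds h; omega
  | succ fuel ih =>
      intro n ds h
      rw [Nat.toDigitsCore.eq_def]
      simp only
      by_cases h2 : n / 2 = 0
      · have hn : n = 0 ∨ n = 1 := by omega
        rcases hn with rfl | rfl
        · norm_num [Nat.digitChar]
        · norm_num [Nat.digitChar, sig_one]
      · rw [if_neg h2, ih (n / 2) _ (by omega)]
        rw [if_neg h2]
        have hs : sig n = sig (n / 2) ++ [if n % 2 = 1 then '1' else '0'] := by
          rw [sig, if_neg (by omega)]
        rw [if_neg (by omega : ¬ n = 0), hs]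
        rcases Nat.mod_two_eq_zero_or_one n with h2' | h2' <;>
          simp [h2', Nat.digitChar]

theorem toDigits_two_eq (n : Nat) :
    Nat.toDigits 2 n = (if n = 0 then ['0'] else sig n) := by
  have := toDigitsCore_eq (n + 1) n [] (Nat.lt_succ_self n)
  simpa [Nat.toDigits] using this

theorem sig_length_le (k n : Nat) (h : n < 2 ^ k) : (sig n).length ≤ k := by
  induction k generalizing n with
  | zero => interval_cases n; simp [sig_zero]
  | succ k ih =>
      by_cases h0 : n = 0
      · simp [h0, sig_zero]
      · rw [sig, if_neg h0]
        have : n / 2 < 2 ^ k := by omega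
        have := ih (n / 2) this
        simp; omega

theorem lt_two_pow_sig_length (n : Nat) : n < 2 ^ (sig n).length := by
  induction n using Nat.strong_induction_on with
  | _ n ih =>
      by_cases h0 : n = 0
      · simp [h0, sig_zero]
      · rw [sig, if_neg h0]
        have hlt : n / 2 < n := Nat.div_lt_self (Nat.pos_of_ne_zero h0) (by norm_num)
        have h1 : n / 2 < 2 ^ (sig (n / 2)).length := ih (n / 2) hlt
        simp only [List.length_append, List.length_singleton]
        rw [pow_succ]
        omega

theorem pad_sig_fixBin (k n : Nat) (h : n < 2 ^ k) :
    List.replicate (k - (sig n).length) '0' ++ sig n = fixBin k n := by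
  induction k generalizing n with
  | zero =>
      interval_cases n
      simp [sig_zero, fixBin]
  | succ k ih =>
      by_cases h0 : n = 0
      · simp [h0, sig_zero, fixBin_zero]
      · have hdiv : n / 2 < 2 ^ k := by omega
        have hl : (sig (n / 2)).length ≤ k := sig_length_le k _ hdiv
        have hs : sig n = sig (n / 2) ++ [if n % 2 = 1 then '1' else '0'] := by
          rw [sig, if_neg h0]
        rw [hs, fixBin, ← ih (n / 2) hdiv]
        simp only [List.length_append, List.length_singleton]
        rw [show k + 1 - ((sig (n / 2)).length + 1) = k - (sig (n / 2)).length by omega]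
        simp [List.append_assoc]

-- ===== str.replace, on the shapes intToBin produces =====

theorem go_nil (old new : List Char) (fuel : Nat) (acc : List Char) :
    PySem.Chars.replace.go old new fuel [] acc = acc.reverse := by
  cases fuel <;> rw [PySem.Chars.replace.go.eq_def] <;> simp

theorem go_cons {old : List Char} {c : Char} {t : List Char}
    (new : List Char) (fuel : Nat) (acc : List Char)
    (h : old.isPrefixOf (c :: t) = false) :
    PySem.Chars.replace.go old new (fuel + 1) (c :: t) acc
      = PySem.Chars.replace.go old new fuel t (c :: acc) := by
  rw [PySem.Chars.replace.go.eq_def]; simp [h]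

theorem go_cons_pref {old : List Char} {c : Char} {t : List Char}
    (new : List Char) (fuel : Nat) (acc : List Char)
    (h : old.isPrefixOf (c :: t) = true) :
    PySem.Chars.replace.go old new (fuel + 1) (c :: t) acc
      = PySem.Chars.replace.go old new fuel (List.drop old.length (c :: t)) (new.reverse ++ acc) := by
  rw [PySem.Chars.replace.go.eq_def]; simp [h]

theorem replace_go_no_b (l : List Char) : ∀ (fuel : Nat) (acc : List Char),
    l.length ≤ fuel → ('b' ∉ l) →
    PySem.Chars.replace.go ['0', 'b'] [] fuel l acc = acc.reverse ++ l := by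
  induction l with
  | nil => intro fuel acc _ _; rw [go_nil]; simp
  | cons c t ih =>
      intro fuel acc hf hb
      cases fuel with
      | zero => simp at hf
      | succ fuel =>
          have hpf : (['0', 'b'].isPrefixOf (c :: t)) = false := by
            cases t with
            | nil => simp [List.isPrefixOf]
            | cons d t' =>
                have hd : d ≠ 'b' := fun h => hb (by simp [h])
                simp [List.isPrefixOf, Ne.symm hd]
          rw [go_cons _ _ _ hpf,
            ih fuel (c :: acc) (by simp at hf ⊢; omega)
              (fun h => hb (List.mem_cons_of_mem _ h))]
          simp

theorem replace_go_no_head (h : Char) (old new : List Char) (l : List Char) :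
    ∀ (fuel : Nat) (acc : List Char), l.length ≤ fuel → (h ∉ l) →
    PySem.Chars.replace.go (h :: old) new fuel l acc = acc.reverse ++ l := by
  induction l with
  | nil => intro fuel acc _ _; rw [go_nil]; simp
  | cons c t ih =>
      intro fuel acc hf hc
      cases fuel with
      | zero => simp at hf
      | succ fuel =>
          have hch : c ≠ h := fun he => hc (by simp [he])
          have hpf : ((h :: old).isPrefixOf (c :: t)) = false := by
            simp [List.isPrefixOf, Ne.symm hch]
          rw [go_cons _ _ _ hpf,
            ih fuel (c :: acc) (by simp at hf ⊢; omega)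
              (fun hm => hc (List.mem_cons_of_mem _ hm))]
          simp

theorem replace_go_zeros (ds : List Char) (hb : 'b' ∉ ds) :
    ∀ (k fuel : Nat) (acc : List Char),
    k + 2 + ds.length ≤ fuel →
    PySem.Chars.replace.go ['0', 'b'] [] fuel
        (List.replicate k '0' ++ '0' :: 'b' :: ds) acc
      = acc.reverse ++ List.replicate k '0' ++ ds := by
  intro k
  induction k with
  | zero =>
      intro fuel acc hf
      cases fuel with
      | zero => omega
      | succ fuel =>
          simp only [List.replicate_zero, List.nil_append]
          have hpf : (['0', 'b'].isPrefixOf ('0' :: 'b' :: ds)) = true := by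
            simp [List.isPrefixOf]
          rw [go_cons_pref _ _ _ hpf]
          rw [show List.drop (['0', 'b'] : List Char).length ('0' :: 'b' :: ds) = ds from rfl]
          rw [replace_go_no_b ds fuel _ (by simp at hf; omega) hb]
          simp
  | succ k ih =>
      intro fuel acc hf
      cases fuel with
      | zero => omega
      | succ fuel =>
          rw [List.replicate_succ, List.cons_append]
          have hpf : (['0', 'b'].isPrefixOf
              ('0' :: (List.replicate k '0' ++ '0' :: 'b' :: ds))) = false := by
            cases k with
            | zero => simp [List.isPrefixOf]
            | succ k => simp [List.replicate_succ, List.isPrefixOf]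
          rw [go_cons _ _ _ hpf, ih fuel ('0' :: acc) (by omega)]
          simp [List.replicate_succ]

theorem replace_zeros_0b (k : Nat) (ds : List Char) (hb : 'b' ∉ ds) :
    PySem.Chars.replace (List.replicate k '0' ++ '0' :: 'b' :: ds) ['0', 'b'] []
      = List.replicate k '0' ++ ds := by
  rw [PySem.Chars.replace]
  simp only [List.isEmpty_cons, Bool.false_eq_true, if_false]
  rw [replace_go_zeros ds hb k _ [] (by simp; omega)]
  simp

theorem replace_no_dash (l : List Char) (hd : '-' ∉ l) :
    PySem.Chars.replace l ['-'] [] = l := by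
  rw [PySem.Chars.replace]
  simp only [List.isEmpty_cons, Bool.false_eq_true, if_false]
  rw [replace_go_no_head '-' [] [] l l.length [] le_rfl hd]
  simp

-- ===== the a-string equals the 64-bit two's-complement bit string =====

-- two's-complement 64-bit value of storeId, as a Nat
def tc64 (s : Int) : Nat := (PySem.Int.mod s 18446744073709551616).toNat

theorem tc64_cast (s : Int) : (tc64 s : Int) = PySem.Int.mod s 18446744073709551616 := by
  unfold tc64
  rw [PySem.Int.mod_eq_emod_of_pos (by norm_num)]
  exact Int.toNat_of_nonneg (Int.emod_nonneg s (by norm_num))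

theorem tc64_lt (s : Int) : tc64 s < 2 ^ 64 := by
  unfold tc64
  rw [PySem.Int.mod_eq_emod_of_pos (by norm_num)]
  have h1 := Int.emod_lt_of_pos s (show (0:Int) < 18446744073709551616 by norm_num)
  have h2 := Int.emod_nonneg s (show (18446744073709551616:Int) ≠ 0 by norm_num)
  have : (2:Nat) ^ 64 = 18446744073709551616 := by norm_num
  omega

theorem pad_dig_fixBin (n : Nat) (h : n < 2 ^ 64) :
    List.replicate (64 - (if n = 0 then ['0'] else sig n).length) '0'
        ++ (if n = 0 then ['0'] else sig n) = fixBin 64 n := by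
  by_cases h0 : n = 0
  · subst h0
    rw [if_pos rfl, fixBin_zero]
    norm_num
    rw [show (64:Nat) = 63 + 1 from rfl, List.replicate_succ' (n := 63)]
  · rw [if_neg h0]; exact pad_sig_fixBin 64 n h

theorem intToBin_eq_fixBin (s : Int) (hlo : -2147483648 ≤ s) (hhi : s ≤ 2147483648) :
    intToBin s 64 true = fixBin 64 (tc64 s) := by
  by_cases hs : 0 ≤ s
  · -- nonnegative branch
    have hn : tc64 s = s.toNat := by
      unfold tc64
      rw [PySem.Int.mod_eq_emod_of_pos (by norm_num), Int.emod_eq_of_lt hs (by omega)]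
    set n := s.toNat with hn'
    have hnlt : n < 2 ^ 64 := by
      have : (2:Nat) ^ 64 = 18446744073709551616 := by norm_num
      omega
    have hdig : Nat.toDigits 2 n = (if n = 0 then ['0'] else sig n) := toDigits_two_eq n
    set dig := if n = 0 then ['0'] else sig n with hdigdef
    have hb : 'b' ∉ dig := by
      intro hmem
      rw [hdigdef] at hmem
      split at hmem
      · simp at hmem
      · rcases mem_sig n _ hmem with h | h <;> simp at h
    have hlen : dig.length ≤ 64 := by
      rw [hdigdef]; split
      · simp
      · exact sig_length_le 64 n hnlt
    unfold intToBin
    rw [if_pos rfl, if_pos (by omega : s ≥ 0)]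
    simp only [PySem.Int.toBinChars0b, if_neg (by omega : ¬ s < 0), ← hn', hdig]
    have hlb : (('0' :: 'b' :: dig : List Char).length : Int) = (dig.length : Int) + 2 := by
      simp; omega
    rw [hlb]
    rw [show ((64:Int) + 2 - ((dig.length : Int) + 2)).toNat = 64 - dig.length by omega]
    rw [replace_zeros_0b _ _ hb]
    rw [replace_no_dash _ ?hdash]
    case hdash =>
      intro hmem
      rcases List.mem_append.1 hmem with h | h
      · exact absurd (List.eq_of_mem_replicate h) (by decide)
      · rw [hdigdef] at h
        split at h
        · simp at h
        · rcases mem_sig n _ h with h' | h' <;> simp at h'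
    rw [hn]
    exact pad_dig_fixBin n hnlt
  · -- negative branch
    push_neg at hs
    have hpow : (2:Int) ^ ((64:Int)).toNat = 18446744073709551616 := by
      rw [show ((64:Int)).toNat = 64 from rfl]; norm_num
    have hb2 : (0:Int) ≤ 2 ^ ((64:Int)).toNat + s := by rw [hpow]; omega
    have hn : tc64 s = ((2:Int) ^ ((64:Int)).toNat + s).toNat := by
      unfold tc64
      rw [PySem.Int.mod_eq_emod_of_pos (by norm_num), hpow]
      have : s % 18446744073709551616 = s + 18446744073709551616 := by omega
      omega
    set n := ((2:Int) ^ ((64:Int)).toNat + s).toNat with hn'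
    have hnn : (n : Int) = 18446744073709551616 + s := by
      rw [hn', hpow]; omega
    have hnlt : n < 2 ^ 64 := by
      have : (2:Nat) ^ 64 = 18446744073709551616 := by norm_num
      omega
    have hnge : 2 ^ 63 ≤ n := by
      have : (2:Nat) ^ 63 = 9223372036854775808 := by norm_num
      omega
    have hne : n ≠ 0 := by omega
    have hdig : Nat.toDigits 2 n = sig n := by rw [toDigits_two_eq, if_neg hne]
    have hlen : (sig n).length = 64 := by
      have hle : (sig n).length ≤ 64 := sig_length_le 64 n hnlt
      by_contra hne'
      have h63 : (sig n).length ≤ 63 := by omega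
      have h1 := lt_two_pow_sig_length n
      have : n < 2 ^ 63 :=
        lt_of_lt_of_le h1 (Nat.pow_le_pow_right (by norm_num) h63)
      omega
    unfold intToBin
    rw [if_pos rfl, if_neg (by omega : ¬ s ≥ 0)]
    simp only [PySem.Int.toBinChars0b, if_neg (by omega : ¬ (2 ^ ((64:Int)).toNat + s < 0)),
      ← hn', hdig]
    have hlb : (('0' :: 'b' :: sig n : List Char).length : Int) = (64 : Int) + 2 := by
      simp [hlen]
    rw [hlb]
    rw [show ((64:Int) + 2 - ((64:Int) + 2)).toNat = 0 by norm_num]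
    rw [List.replicate_zero, List.nil_append]
    have hb : 'b' ∉ sig n := by
      intro hmem; rcases mem_sig n _ hmem with h | h <;> simp at h
    have hrep := replace_zeros_0b 0 (sig n) hb
    simp only [List.replicate_zero, List.nil_append] at hrep
    rw [hrep]
    rw [replace_no_dash _ ?hdash2]
    case hdash2 =>
      intro hmem; rcases mem_sig n _ hmem with h | h <;> simp at h
    rw [hn]
    rw [← pad_sig_fixBin 64 n hnlt, hlen]
    simp

-- ===== the XOR loop =====

theorem loop_eq_zipWith (a b : List Char) (hb : b.length = a.length) :
    (PySem.List.pyRange 0 (a.length : Int) 1).foldl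
      (fun c i =>
        if PySem.List.pyGetD a i ' ' = PySem.List.pyGetD b i ' ' then c ++ ['0']
        else c ++ ['1']) []
    = List.zipWith (fun x y => if x = y then '0' else '1') a b := by
  have key : ∀ k, k ≤ a.length →
      (List.map (fun j : Nat => (j : Int)) (List.range k)).foldl
        (fun c i =>
          if PySem.List.pyGetD a i ' ' = PySem.List.pyGetD b i ' ' then c ++ ['0']
          else c ++ ['1']) []
      = List.zipWith (fun x y => if x = y then '0' else '1') (a.take k) (b.take k) := by
    intro k
    induction k with
    | zero => simp
    | succ k ih =>
        intro hk
        have hk' : k ≤ a.length := by omega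
        have hka : k < a.length := by omega
        have hkb : k < b.length := by omega
        rw [List.range_succ, List.map_append, List.foldl_append, ih hk']
        simp only [List.map_cons, List.map_nil, List.foldl_cons, List.foldl_nil]
        have hga : PySem.List.pyGetD a (k : Int) ' ' = a[k] := by
          rw [PySem.List.pyGetD_natCast]
          exact List.getD_eq_getElem a ' ' hka
        have hgb : PySem.List.pyGetD b (k : Int) ' ' = b[k] := by
          rw [PySem.List.pyGetD_natCast]
          exact List.getD_eq_getElem b ' ' hkb
        rw [hga, hgb]
        rw [List.take_succ, List.take_succ,
          List.getElem?_eq_getElem hka, List.getElem?_eq_getElem hkb]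
        rw [List.zipWith_append (by simp [List.length_take]; omega)]
        by_cases heq : a[k] = b[k] <;> simp [heq]
  rw [PySem.List.pyRange_zero_natCast]
  have := key a.length le_rfl
  simpa [List.take_of_length_le, hb.le, hb] using this

theorem xor_bit (a b r s : Nat) (hr : r < 2) (hs : s < 2) :
    (2 * a + r) ^^^ (2 * b + s) = 2 * (a ^^^ b) + (r ^^^ s) := by
  have hxs : r ^^^ s < 2 := by
    rcases (by omega : r = 0 ∨ r = 1) with rfl | rfl <;>
      rcases (by omega : s = 0 ∨ s = 1) with rfl | rfl <;> decide
  apply Nat.eq_of_testBit_eq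
  intro i
  cases i with
  | zero =>
      rw [Nat.testBit_xor]
      simp only [Nat.testBit_zero]
      have h1 : (2 * a + r) % 2 = r := by omega
      have h2 : (2 * b + s) % 2 = s := by omega
      have h3 : (2 * (a ^^^ b) + (r ^^^ s)) % 2 = r ^^^ s := by omega
      rw [h1, h2, h3]
      rcases (by omega : r = 0 ∨ r = 1) with rfl | rfl <;>
        rcases (by omega : s = 0 ∨ s = 1) with rfl | rfl <;> decide
  | succ i =>
      rw [Nat.testBit_xor]
      simp only [Nat.testBit_succ]
      have h1 : (2 * a + r) / 2 = a := by omega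
      have h2 : (2 * b + s) / 2 = b := by omega
      have h3 : (2 * (a ^^^ b) + (r ^^^ s)) / 2 = a ^^^ b := by omega
      rw [h1, h2, h3, ← Nat.testBit_xor]

theorem parseA_zipWith_xor (k : Nat) : ∀ (x y : Nat),
    parseA 0 (List.zipWith (fun a b => if a = b then '0' else '1') (fixBin k x) (fixBin k y))
      = (x % 2 ^ k) ^^^ (y % 2 ^ k) := by
  induction k with
  | zero => intro x y; simp [fixBin, parseA, Nat.mod_one]
  | succ k ih =>
      intro x y
      rw [fixBin, fixBin]
      rw [List.zipWith_append (by rw [fixBin_length, fixBin_length])]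
      unfold parseA
      rw [List.foldl_append]
      show parseA (parseA 0 _) _ = _
      rw [ih (x / 2) (y / 2)]
      have hmx : x % 2 ^ (k + 1) = 2 * (x / 2 % 2 ^ k) + x % 2 := by
        rw [show 2 ^ (k + 1) = 2 * 2 ^ k by ring, Nat.mod_mul]; ring
      have hmy : y % 2 ^ (k + 1) = 2 * (y / 2 % 2 ^ k) + y % 2 := by
        rw [show 2 ^ (k + 1) = 2 * 2 ^ k by ring, Nat.mod_mul]; ring
      rw [hmx, hmy, xor_bit _ _ _ _ (Nat.mod_lt x (by norm_num)) (Nat.mod_lt y (by norm_num))]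
      rcases Nat.mod_two_eq_zero_or_one x with hx | hx <;>
        rcases Nat.mod_two_eq_zero_or_one y with hy | hy <;>
          simp [parseA, List.foldl, hx, hy]

theorem intBase2_eq (ds : List Char) :
    intBase2 ('0' :: 'b' :: ds) = ((parseA 0 ds : Nat) : Int) := rfl

-- ===== main =====

set_option maxHeartbeats 1000000 in
theorem tableId_eq_core (s m : Int) (hlo : -2147483648 ≤ s) (hhi : s ≤ 2147483648) :
    tableId s m = tableId_alt s m := by
  set n := tc64 s with hn
  have hnlt : n < 2 ^ 64 := tc64_lt s
  have ha : intToBin s 64 true = fixBin 64 n := intToBin_eq_fixBin s hlo hhi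
  simp only [tableId, tableId_alt]
  rw [ha]
  have hlena : (fixBin 64 n).length = 64 := fixBin_length 64 n
  have hsplit32 : fixBin 64 n = fixBin 32 (n / 2 ^ 32) ++ fixBin 32 n := fixBin_split 32 32 n
  have hslice32 : PySem.List.slice (fixBin 64 n) (some 0) (some 32)
      = fixBin 32 (n / 2 ^ 32) := by
    rw [PySem.List.slice_zero_start,
      show (32:Int) = ((32:Nat):Int) by norm_num,
      PySem.List.slice_to_natCast, hsplit32,
      List.take_left' (by rw [fixBin_length])]
  rw [hslice32, hlena]
  set b := List.replicate 32 '0' ++ fixBin 32 (n / 2 ^ 32) with hbdef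
  have hlenb : b.length = 64 := by simp [hbdef, fixBin_length]
  have hloop := loop_eq_zipWith (fixBin 64 n) b (by rw [hlenb, hlena])
  rw [hlena] at hloop
  rw [hloop]
  set f : Char → Char → Char := fun x y => if x = y then '0' else '1' with hf
  have hdrop : PySem.List.slice (List.zipWith f (fixBin 64 n) b) (some 33) none
      = List.zipWith f (fixBin 31 n) (fixBin 31 (n / 2 ^ 32)) := by
    rw [show (33:Int) = ((33:Nat):Int) by norm_num,
      PySem.List.slice_from_natCast]
    rw [List.drop_zipWith]
    have h1 : List.drop 33 (fixBin 64 n) = fixBin 31 n := by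
      rw [show (64:Nat) = 33 + 31 by norm_num, fixBin_split 33 31 n,
        List.drop_left' (by rw [fixBin_length])]
    have h2 : List.drop 33 b = fixBin 31 (n / 2 ^ 32) := by
      rw [hbdef, show (32:Nat) = 1 + 31 by norm_num,
        fixBin_split 1 31 (n / 2 ^ 32), ← List.append_assoc]
      rw [List.drop_left' (by simp [fixBin_length])]
    rw [h1, h2]
  rw [hdrop]
  have hparse : intBase2 (['0', 'b'] ++ List.zipWith f (fixBin 31 n) (fixBin 31 (n / 2 ^ 32)))
      = ((n % 2 ^ 31) ^^^ (n / 2 ^ 32 % 2 ^ 31) : Nat) := by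
    rw [show (['0', 'b'] : List Char) ++ List.zipWith f (fixBin 31 n) (fixBin 31 (n / 2 ^ 32))
        = '0' :: 'b' :: List.zipWith f (fixBin 31 n) (fixBin 31 (n / 2 ^ 32)) by simp]
    rw [intBase2_eq, hf, parseA_zipWith_xor 31 n (n / 2 ^ 32)]
  rw [hparse]
  rw [← tc64_cast s, ← hn]
  rw [show ((2147483648:Int)) = ((2 ^ 31 : Nat) : Int) by norm_num,
    show ((4294967296:Int)) = ((2 ^ 32 : Nat) : Int) by norm_num]
  rw [PySem.Int.mod_natCast, PySem.Int.floordiv_natCast, PySem.Int.mod_natCast,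
    PySem.Int.bxor_natCast]

-- ===== VERDICT (by name: the statement is the Claim_ definition above) =====
theorem tableId_spec : Claim_equal_tableId := by
  intro s m hdom _hpre
  unfold Spec_tableId
  unfold Dom_tableId pvDomInt at hdom
  rw [Bool.and_eq_true, decide_eq_true_eq, decide_eq_true_eq] at hdom
  exact tableId_eq_core s m hdom.1.1 hdom.1.2
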